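-- pv_equiv track=rewrite | github.com/BosaBL/vertical-fragmentation | fragments.py | fragment
-- ===== SOURCE A (Python) =====
-- def fragment(
--     use_matrix: list[int],
--     freq_matrix: list[int],
--     ca_matrix: list[int],
--     order: list[int],
--     freq_sum: list[int],
-- ):
--     fragment_candidates = []
--
--     for i in range(len(order) - 1):
--         up_set = order[: i + 1]
--         bot_set = order[i + 1 :]
--
--         ctq = 0
--         cbq = 0
--         coq = 0
--
--         # Check for querys that are only on the upper set.
--         for q_num, query in enumerate(use_matrix):
--             flag = True
--             for attribute_idx in range(len(query)):
--                 if attribute_idx not in up_set and query[attribute_idx] == 1: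
--                     flag = False
--                     break
--             if flag == True:
--                 ctq += freq_sum[q_num]
--
--         # Check for querys that are only on the bottom set.
--         for q_num, query in enumerate(use_matrix):
--             flag = True
--             for attribute_idx in range(len(query)):
--                 if attribute_idx in up_set and query[attribute_idx] == 1:
--                     flag = False
--                     break
--             if flag == True:
--                 cbq += freq_sum[q_num]
--
--         # Check for querys that have both cases at the same times.
--         for q_num, query in enumerate(use_matrix):
--             flag_one = False
--             flag_two = False
--             for attribute_idx in range(len(query)):
--                 if attribute_idx in up_set and query[attribute_idx] == 1:
--                     flag_one = True
--                 if attribute_idx in bot_set and query[attribute_idx] == 1: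
--                     flag_two = True
--
--             if flag_one == True and flag_two == True:
--                 coq += freq_sum[q_num]
--
--         value = ctq * cbq - coq**2
--         fragment_candidates.append([value, up_set, bot_set])
--
--     best_fragment = max(fragment_candidates, key=lambda x: x[0])
--
--     for i in range(1, 3):
--         if 0 not in best_fragment[i]:
--             best_fragment[i].append(0)
--
--     best_fragment[1].sort()
--     best_fragment[2].sort()
--
--     return (best_fragment[1], best_fragment[2])
-- ===== SOURCE B (Python) =====
-- def fragment(
--     use_matrix: list[int],
--     freq_matrix: list[int],
--     ca_matrix: list[int],
--     order: list[int],
--     freq_sum: list[int],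
-- ):
--     n = len(order)
--     rev = order[::-1]
--
--     # Precompute, per query, the positions (within `order`) of its used attributes,
--     # reduced to three thresholds; each split is then scored in O(1) per query.
--     stats = []
--     for query in use_matrix:
--         ones = [idx for idx, v in enumerate(query) if v == 1]
--         firsts = [order.index(a) for a in ones if a in order]
--         lasts = [n - 1 - rev.index(a) for a in ones if a in order]
--         known = len(firsts) == len(ones)
--         max_f = max(firsts) if known and firsts else None
--         min_f = min(firsts) if firsts else None
--         max_l = max(lasts) if lasts else None
--         stats.append((known, max_f, min_f, max_l))
--
--     best_v = None
--     best_k = 0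
--     for k in range(n - 1):
--         ctq = 0
--         cbq = 0
--         coq = 0
--         for (known, max_f, min_f, max_l), f in zip(stats, freq_sum):
--             if known and (max_f is None or max_f <= k):
--                 ctq += f
--             if min_f is None or min_f > k:
--                 cbq += f
--             if min_f is not None and min_f <= k and max_l > k:
--                 coq += f
--         v = ctq * cbq - coq * coq
--         if best_v is None or v > best_v:
--             best_v = v
--             best_k = k
--
--     if best_v is None:
--         raise ValueError("order must contain at least two attributes")
--
--     up = order[: best_k + 1]
--     bot = order[best_k + 1:]
--     if 0 not in up:
--         up.append(0)
--     if 0 not in bot: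
--         bot.append(0)
--     return (sorted(up), sorted(bot))
-- ===== Notes on version B (the rewrite author's own statement) =====
-- stated objective: faster
-- what changed: Instead of re-scanning, for every split, every query's attributes three times with list-membership tests against the up/bot slices, B precomputes per query the first/last positions (in `order`) of its used attributes, reduced to three thresholds (max-first, min-first, max-last), scores each split with a few integer comparisons per query, and tracks the running best split instead of materialising all candidates and calling max.
-- outside the precondition, e.g. on fragment([[1, 1]], [], [], [0, 9], []): A returns ([0], [0, 9]), B returns ([0], [0, 9])
import Mathlib
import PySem

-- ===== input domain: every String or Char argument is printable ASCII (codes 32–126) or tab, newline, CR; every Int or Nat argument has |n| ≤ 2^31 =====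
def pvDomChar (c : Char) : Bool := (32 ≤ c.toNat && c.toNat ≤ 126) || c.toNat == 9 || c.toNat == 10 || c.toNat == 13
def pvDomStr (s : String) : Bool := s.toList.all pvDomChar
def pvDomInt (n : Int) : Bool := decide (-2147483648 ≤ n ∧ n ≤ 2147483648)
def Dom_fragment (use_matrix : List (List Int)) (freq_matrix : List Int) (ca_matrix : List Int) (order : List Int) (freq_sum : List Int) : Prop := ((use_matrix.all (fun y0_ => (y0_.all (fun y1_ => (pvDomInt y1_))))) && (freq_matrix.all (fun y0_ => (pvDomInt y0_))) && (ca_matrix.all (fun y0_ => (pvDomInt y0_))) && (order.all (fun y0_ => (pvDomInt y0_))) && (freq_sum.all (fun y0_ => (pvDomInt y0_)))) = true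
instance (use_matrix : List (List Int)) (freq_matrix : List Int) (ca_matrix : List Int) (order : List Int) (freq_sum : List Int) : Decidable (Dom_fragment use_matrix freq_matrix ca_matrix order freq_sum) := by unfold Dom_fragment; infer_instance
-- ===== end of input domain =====

-- B replaces A's per-split triple scan over all attributes (with membership tests against the
-- slices) by precomputed per-query first/last position thresholds in `order`, scoring each split
-- with a few comparisons per query and tracking the running best split (objective: faster).

-- ===== PORT A =====
-- inner 'for attribute_idx in range(len(query)): ... break' of the ctq pass
def pvCtqFlag (up : List Int) (query : List Int) : List Int → Bool
  | [] => true
  | idx :: rest =>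
      if idx ∉ up ∧ PySem.List.pyGetD query idx 0 = 1 then false
      else pvCtqFlag up query rest

-- inner loop of the cbq pass
def pvCbqFlag (up : List Int) (query : List Int) : List Int → Bool
  | [] => true
  | idx :: rest =>
      if idx ∈ up ∧ PySem.List.pyGetD query idx 0 = 1 then false
      else pvCbqFlag up query rest

-- inner loop of the coq pass (no break; the pair (flag_one, flag_two))
def pvCoqFlags (up bot : List Int) (query : List Int) : Bool × Bool :=
  (PySem.List.pyRange 0 (query.length : Int) 1).foldl
    (fun fl idx =>
      ((if idx ∈ up ∧ PySem.List.pyGetD query idx 0 = 1 then true else fl.1),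
       (if idx ∈ bot ∧ PySem.List.pyGetD query idx 0 = 1 then true else fl.2)))
    (false, false)

-- body of A's outer 'for i in range(len(order) - 1)': the candidate [value, up_set, bot_set];
-- freq_sum[q_num] is ported with pyGetD (Pre_fragment keeps every access in range)
def pvCandA (use_matrix : List (List Int)) (order freq_sum : List Int) (i : Int) :
    Int × List Int × List Int :=
  let up := PySem.List.slice order none (some (i + 1))
  let bot := PySem.List.slice order (some (i + 1)) none
  let ctq := (PySem.List.enumerate use_matrix).foldl
    (fun c p => if pvCtqFlag up p.2 (PySem.List.pyRange 0 (p.2.length : Int) 1) = true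
                then c + PySem.List.pyGetD freq_sum p.1 0 else c) 0
  let cbq := (PySem.List.enumerate use_matrix).foldl
    (fun c p => if pvCbqFlag up p.2 (PySem.List.pyRange 0 (p.2.length : Int) 1) = true
                then c + PySem.List.pyGetD freq_sum p.1 0 else c) 0
  let coq := (PySem.List.enumerate use_matrix).foldl
    (fun c p => if (pvCoqFlags up bot p.2).1 = true ∧ (pvCoqFlags up bot p.2).2 = true
                then c + PySem.List.pyGetD freq_sum p.1 0 else c) 0
  (ctq * cbq - coq ^ 2, up, bot)

def fragment (use_matrix : List (List Int)) (freq_matrix : List Int) (ca_matrix : List Int) (order : List Int) (freq_sum : List Int) : List Int × List Int :=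
  let cands := (PySem.List.pyRange 0 ((order.length : Int) - 1) 1).foldl
      (fun acc i => acc ++ [pvCandA use_matrix order freq_sum i]) []
  match PySem.List.max? cands (fun c => c.1) with
  | none => ([], [])   -- Python: max([]) raises ValueError; excluded by Pre_fragment
  | some best =>
      let u := if (0 : Int) ∈ best.2.1 then best.2.1 else best.2.1 ++ [0]
      let b := if (0 : Int) ∈ best.2.2 then best.2.2 else best.2.2 ++ [0]
      (PySem.List.sorted u (fun x => x) false, PySem.List.sorted b (fun x => x) false)

-- ===== PORT B =====
-- [idx for idx, v in enumerate(query) if v == 1]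
def pvOnes (query : List Int) : List Int :=
  ((PySem.List.enumerate query).filter (fun p => p.2 == 1)).map Prod.fst

-- per-query thresholds (known, max_f, min_f, max_l) of Source B; the guarded comprehensions
-- '[... for a in ones if a in order]' are ported as filterMap over index?
def pvStat (order rev : List Int) (n : Int) (query : List Int) :
    Bool × Option Int × Option Int × Option Int :=
  let ones := pvOnes query
  let firsts := ones.filterMap (fun a => (PySem.List.index? order a).map (fun (p : Nat) => (p : Int)))
  let lasts := ones.filterMap (fun a => (PySem.List.index? rev a).map (fun (p : Nat) => n - 1 - (p : Int)))
  let known := firsts.length == ones.length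
  let maxF := if known = true ∧ firsts ≠ [] then PySem.List.max? firsts (fun x => x) else none
  let minF := PySem.List.min? firsts (fun x => x)
  let maxL := PySem.List.max? lasts (fun x => x)
  (known, maxF, minF, maxL)

-- score of split k: one pass over zip(stats, freq_sum); the 'is None' tests are Option.all/any
def pvScore (zs : List ((Bool × Option Int × Option Int × Option Int) × Int)) (k : Int) : Int :=
  let t := zs.foldl
    (fun (t : Int × Int × Int) sf =>
      ((if sf.1.1 && sf.1.2.1.all (fun m => decide (m ≤ k))
        then t.1 + sf.2 else t.1),
       (if sf.1.2.2.1.all (fun m => decide (k < m))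
        then t.2.1 + sf.2 else t.2.1),
       (if sf.1.2.2.1.any (fun m => decide (m ≤ k)) && sf.1.2.2.2.any (fun l => decide (k < l))
        then t.2.2 + sf.2 else t.2.2)))
    (0, 0, 0)
  t.1 * t.2.1 - t.2.2 * t.2.2

def fragment_alt (use_matrix : List (List Int)) (freq_matrix : List Int) (ca_matrix : List Int) (order : List Int) (freq_sum : List Int) : List Int × List Int :=
  let n : Int := order.length
  let rev := order.reverse   -- order[::-1]; PySem.List.slice?_none_none_neg_one
  let stats := use_matrix.foldl (fun acc q => acc ++ [pvStat order rev n q]) []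
  let zs := stats.zip freq_sum
  let best := (PySem.List.pyRange 0 (n - 1) 1).foldl
    (fun (st : Option Int × Int) k =>
      let v := pvScore zs k
      if st.1.all (fun bv => decide (bv < v)) then (some v, k) else st)   -- best_v is None or v > best_v
    ((none, 0) : Option Int × Int)
  if best.1 = none then ([], [])   -- Source B raises ValueError here; excluded by Pre_fragment
  else
      let up0 := PySem.List.slice order none (some (best.2 + 1))
      let bot0 := PySem.List.slice order (some (best.2 + 1)) none
      let u := if (0 : Int) ∈ up0 then up0 else up0 ++ [0]
      let b := if (0 : Int) ∈ bot0 then bot0 else bot0 ++ [0]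
      (PySem.List.sorted u (fun x => x) false, PySem.List.sorted b (fun x => x) false)

-- ===== PRECONDITION & SPEC =====
-- Pre_ excludes (i) order with fewer than two entries, where A raises ValueError on max([]), and
-- (ii) freq_sum shorter than use_matrix, where A's freq_sum[q_num] raises IndexError whenever an
-- out-of-range query ever passes one of the three tests (A returns only on rare inputs of that shape).
def Pre_fragment (use_matrix : List (List Int)) (freq_matrix : List Int) (ca_matrix : List Int) (order : List Int) (freq_sum : List Int) : Prop :=
  2 ≤ order.length ∧ use_matrix.length ≤ freq_sum.length
instance (use_matrix : List (List Int)) (freq_matrix : List Int) (ca_matrix : List Int) (order : List Int) (freq_sum : List Int) : Decidable (Pre_fragment use_matrix freq_matrix ca_matrix order freq_sum) := by unfold Pre_fragment; infer_instance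

def pvWitness_fragment : List (List Int) × List Int × List Int × List Int × List Int :=
  ([[1, 0], [0, 1]], [], [], [0, 1], [5, 3])

def Spec_fragment (use_matrix : List (List Int)) (freq_matrix : List Int) (ca_matrix : List Int) (order : List Int) (freq_sum : List Int) (out : List Int × List Int) : Prop := out = fragment_alt use_matrix freq_matrix ca_matrix order freq_sum
instance (use_matrix : List (List Int)) (freq_matrix : List Int) (ca_matrix : List Int) (order : List Int) (freq_sum : List Int) (out : List Int × List Int) : Decidable (Spec_fragment use_matrix freq_matrix ca_matrix order freq_sum out) := by unfold Spec_fragment; infer_instance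

-- ===== CLAIM (what is proved, stated in full; the proofs are below) =====
def Claim_equal_fragment : Prop := ∀ (use_matrix : List (List Int)) (freq_matrix : List Int) (ca_matrix : List Int) (order : List Int) (freq_sum : List Int), Dom_fragment use_matrix freq_matrix ca_matrix order freq_sum → Pre_fragment use_matrix freq_matrix ca_matrix order freq_sum → Spec_fragment use_matrix freq_matrix ca_matrix order freq_sum (fragment use_matrix freq_matrix ca_matrix order freq_sum)

-- ===== LEMMAS AND PROOFS =====

-- proof-side names for Source B's two guarded comprehensions
def pvFirsts (order q : List Int) : List Int :=
  (pvOnes q).filterMap (fun a => (PySem.List.index? order a).map (fun (p : Nat) => (p : Int)))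
def pvLasts (rev : List Int) (n : Int) (q : List Int) : List Int :=
  (pvOnes q).filterMap (fun a => (PySem.List.index? rev a).map (fun (p : Nat) => n - 1 - (p : Int)))

lemma pvStat_eq (order rev : List Int) (n : Int) (q : List Int) :
    pvStat order rev n q =
      ((pvFirsts order q).length == (pvOnes q).length,
       (if ((pvFirsts order q).length == (pvOnes q).length) = true ∧ pvFirsts order q ≠ []
        then PySem.List.max? (pvFirsts order q) (fun x => x) else none),
       PySem.List.min? (pvFirsts order q) (fun x => x),
       PySem.List.max? (pvLasts rev n q) (fun x => x)) := rfl

-- A's ctq inner loop: True iff no index carries a 1 outside up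
lemma pvCtqFlag_iff (up query : List Int) (l : List Int) :
    pvCtqFlag up query l = true ↔ ∀ idx ∈ l, idx ∈ up ∨ PySem.List.pyGetD query idx 0 ≠ 1 := by
  induction l with
  | nil => simp [pvCtqFlag]
  | cons x t ih =>
    simp only [pvCtqFlag, List.mem_cons]
    split_ifs with h
    · simp only [false_iff]
      push_neg
      exact ⟨x, Or.inl rfl, by tauto⟩
    · rw [ih]
      push_neg at h
      constructor
      · rintro hall idx (rfl | hm)
        · by_cases hx : idx ∈ up
          · exact Or.inl hx
          · exact Or.inr (h hx)
        · exact hall idx hm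
      · intro hall idx hm; exact hall idx (Or.inr hm)

-- A's cbq inner loop: True iff no index carries a 1 inside up
lemma pvCbqFlag_iff (up query : List Int) (l : List Int) :
    pvCbqFlag up query l = true ↔ ∀ idx ∈ l, idx ∉ up ∨ PySem.List.pyGetD query idx 0 ≠ 1 := by
  induction l with
  | nil => simp [pvCbqFlag]
  | cons x t ih =>
    simp only [pvCbqFlag, List.mem_cons]
    split_ifs with h
    · simp only [false_iff]
      push_neg
      exact ⟨x, Or.inl rfl, by tauto⟩
    · rw [ih]
      constructor
      · rintro hall idx (rfl | hm)
        · by_cases hx : idx ∈ up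
          · exact Or.inr (by tauto)
          · exact Or.inl hx
        · exact hall idx hm
      · intro hall idx hm; exact hall idx (Or.inr hm)

lemma foldl_orpair (p q : Int → Prop) [DecidablePred p] [DecidablePred q] :
    ∀ (l : List Int) (b1 b2 : Bool),
      l.foldl (fun fl idx => ((if p idx then true else fl.1), (if q idx then true else fl.2))) (b1, b2)
      = (b1 || l.any (fun x => decide (p x)), b2 || l.any (fun x => decide (q x))) := by
  intro l
  induction l with
  | nil => simp
  | cons x t ih =>
    intro b1 b2
    simp only [List.foldl_cons, List.any_cons, ih]
    split_ifs with h1 h2 h2 <;> simp [h1, h2]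

-- A's coq inner loop as a pair of existence tests
lemma pvCoqFlags_eq (up bot query : List Int) :
    pvCoqFlags up bot query =
      ((PySem.List.pyRange 0 (query.length : Int) 1).any
         (fun idx => decide (idx ∈ up ∧ PySem.List.pyGetD query idx 0 = 1)),
       (PySem.List.pyRange 0 (query.length : Int) 1).any
         (fun idx => decide (idx ∈ bot ∧ PySem.List.pyGetD query idx 0 = 1))) := by
  unfold pvCoqFlags
  rw [foldl_orpair (fun idx => idx ∈ up ∧ PySem.List.pyGetD query idx 0 = 1)
      (fun idx => idx ∈ bot ∧ PySem.List.pyGetD query idx 0 = 1)]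
  simp

lemma mem_pvOnes (query : List Int) (a : Int) :
    a ∈ pvOnes query ↔ 0 ≤ a ∧ a < (query.length : Int) ∧ PySem.List.pyGetD query a 0 = 1 := by
  unfold pvOnes
  simp only [List.mem_map, List.mem_filter, PySem.List.mem_enumerate_iff, beq_iff_eq]
  constructor
  · rintro ⟨⟨i, q⟩, ⟨⟨k, hk, hpq⟩, hq1⟩, rfl⟩
    cases hpq
    simp only [zero_add]
    have hk' : ((k : Int)) < (query.length : Int) := by exact_mod_cast hk
    refine ⟨by positivity, hk', ?_⟩
    rw [PySem.List.pyGetD_eq_getElem query 0 (by positivity) hk']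
    simpa using hq1
  · rintro ⟨h0, hlt, h1⟩
    have hlt' : a.toNat < query.length := by omega
    refine ⟨(a, query[a.toNat]), ⟨⟨a.toNat, hlt', by simp; omega⟩, ?_⟩, rfl⟩
    rw [PySem.List.pyGetD_eq_getElem query 0 h0 hlt] at h1
    simpa using h1

-- first-occurrence characterisation of membership in a prefix
lemma mem_take_iff_index (l : List Int) (x : Int) :
    ∀ (m : Nat), x ∈ l.take m ↔ ∃ p, PySem.List.index? l x = some p ∧ p < m := by
  induction l with
  | nil => intro m; simp [PySem.List.index?]
  | cons y t ih =>
    intro m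
    cases m with
    | zero => simp
    | succ m' =>
      by_cases hxy : y = x
      · subst hxy
        rw [PySem.List.index?_cons_self]
        simp [List.take_succ_cons]
      · rw [PySem.List.index?_cons_of_ne (v := x) (xs := t) hxy]
        simp only [List.take_succ_cons, List.mem_cons]
        rw [ih m']
        constructor
        · rintro (rfl | ⟨p, hp, hpm⟩)
          · exact absurd rfl hxy
          · exact ⟨p + 1, by rw [hp]; rfl, by omega⟩
        · rintro ⟨p, hp, hpm⟩
          simp only [Option.map_eq_some_iff] at hp
          obtain ⟨p', hp', rfl⟩ := hp
          exact Or.inr ⟨p', hp', by omega⟩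

-- last-occurrence characterisation of membership in a suffix
lemma mem_drop_iff_index_rev (l : List Int) (x : Int) (m : Nat) :
    x ∈ l.drop m ↔ ∃ p, PySem.List.index? l.reverse x = some p ∧ p < l.length - m := by
  rw [← List.mem_reverse, List.reverse_drop, mem_take_iff_index]

lemma mem_pvFirsts (order q : List Int) (x : Int) :
    x ∈ pvFirsts order q ↔ ∃ a ∈ pvOnes q, ∃ p : Nat, PySem.List.index? order a = some p ∧ x = (p : Int) := by
  unfold pvFirsts
  simp only [List.mem_filterMap, Option.map_eq_some_iff]
  aesop

lemma mem_pvLasts (rev : List Int) (n : Int) (q : List Int) (x : Int) :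
    x ∈ pvLasts rev n q ↔ ∃ a ∈ pvOnes q, ∃ p : Nat, PySem.List.index? rev a = some p ∧ x = n - 1 - (p : Int) := by
  unfold pvLasts
  simp only [List.mem_filterMap, Option.map_eq_some_iff]
  aesop

lemma pvFirsts_len_iff (order q : List Int) :
    (pvFirsts order q).length = (pvOnes q).length ↔ ∀ a ∈ pvOnes q, a ∈ order := by
  unfold pvFirsts
  rw [List.filterMap_length_eq_length]
  simp [PySem.List.index?_isSome_iff]

lemma pvFirsts_nil_iff (order q : List Int) :
    pvFirsts order q = [] ↔ ∀ a ∈ pvOnes q, a ∉ order := by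
  unfold pvFirsts
  rw [List.filterMap_eq_nil_iff]
  simp [PySem.List.index?_isSome_iff]

lemma pvLasts_nil_iff (rev : List Int) (n : Int) (q : List Int) :
    pvLasts rev n q = [] ↔ ∀ a ∈ pvOnes q, a ∉ rev := by
  unfold pvLasts
  rw [List.filterMap_eq_nil_iff]
  simp [PySem.List.index?_isSome_iff]

lemma max?_le_iff (xs : List Int) (M k : Int) (h : PySem.List.max? xs (fun x => x) = some M) :
    M ≤ k ↔ ∀ x ∈ xs, x ≤ k := by
  have hmem := PySem.List.max?_mem h
  have hmax := PySem.List.max?_isMax h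
  exact ⟨fun hMk x hx => le_trans (hmax x hx) hMk, fun hall => hall M hmem⟩

lemma lt_min?_iff (xs : List Int) (m k : Int) (h : PySem.List.min? xs (fun x => x) = some m) :
    k < m ↔ ∀ x ∈ xs, k < x := by
  have hmem := PySem.List.min?_mem h
  have hmin := PySem.List.min?_isMin h
  exact ⟨fun hkm x hx => lt_of_lt_of_le hkm (hmin x hx), fun hall => hall m hmem⟩

lemma min?_le_iff (xs : List Int) (m k : Int) (h : PySem.List.min? xs (fun x => x) = some m) :
    m ≤ k ↔ ∃ x ∈ xs, x ≤ k := by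
  have hmem := PySem.List.min?_mem h
  have hmin := PySem.List.min?_isMin h
  exact ⟨fun hmk => ⟨m, hmem, hmk⟩, fun ⟨x, hx, hxk⟩ => le_trans (hmin x hx) hxk⟩

lemma lt_max?_iff (xs : List Int) (M k : Int) (h : PySem.List.max? xs (fun x => x) = some M) :
    k < M ↔ ∃ x ∈ xs, k < x := by
  have hmem := PySem.List.max?_mem h
  have hmax := PySem.List.max?_isMax h
  exact ⟨fun hkM => ⟨M, hmem, hkM⟩, fun ⟨x, hx, hxk⟩ => lt_of_lt_of_le hxk (hmax x hx)⟩

lemma forall_range_ones (q : List Int) (S : List Int) :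
    (∀ idx ∈ PySem.List.pyRange 0 (q.length : Int) 1, idx ∈ S ∨ PySem.List.pyGetD q idx 0 ≠ 1)
    ↔ ∀ a ∈ pvOnes q, a ∈ S := by
  constructor
  · intro h a ha
    rw [mem_pvOnes] at ha
    rcases h a (by rw [PySem.List.mem_pyRange_one]; exact ⟨ha.1, ha.2.1⟩) with h' | h'
    · exact h'
    · exact absurd ha.2.2 h'
  · intro h idx hidx
    rw [PySem.List.mem_pyRange_one] at hidx
    by_cases h1 : PySem.List.pyGetD q idx 0 = 1
    · exact Or.inl (h idx (by rw [mem_pvOnes]; exact ⟨hidx.1, hidx.2, h1⟩))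
    · exact Or.inr h1

lemma forall_range_ones_not (q : List Int) (S : List Int) :
    (∀ idx ∈ PySem.List.pyRange 0 (q.length : Int) 1, idx ∉ S ∨ PySem.List.pyGetD q idx 0 ≠ 1)
    ↔ ∀ a ∈ pvOnes q, a ∉ S := by
  constructor
  · intro h a ha
    rw [mem_pvOnes] at ha
    rcases h a (by rw [PySem.List.mem_pyRange_one]; exact ⟨ha.1, ha.2.1⟩) with h' | h'
    · exact h'
    · exact absurd ha.2.2 h'
  · intro h idx hidx
    rw [PySem.List.mem_pyRange_one] at hidx
    by_cases h1 : PySem.List.pyGetD q idx 0 = 1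
    · exact Or.inl (h idx (by rw [mem_pvOnes]; exact ⟨hidx.1, hidx.2, h1⟩))
    · exact Or.inr h1

lemma any_range_ones (q : List Int) (S : List Int) :
    ((PySem.List.pyRange 0 (q.length : Int) 1).any
        (fun idx => decide (idx ∈ S ∧ PySem.List.pyGetD q idx 0 = 1)) = true)
    ↔ ∃ a ∈ pvOnes q, a ∈ S := by
  rw [List.any_eq_true]
  constructor
  · rintro ⟨idx, hidx, hd⟩
    rw [decide_eq_true_iff] at hd
    rw [PySem.List.mem_pyRange_one] at hidx
    exact ⟨idx, by rw [mem_pvOnes]; exact ⟨hidx.1, hidx.2, hd.2⟩, hd.1⟩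
  · rintro ⟨a, ha, hS⟩
    rw [mem_pvOnes] at ha
    exact ⟨a, by rw [PySem.List.mem_pyRange_one]; exact ⟨ha.1, ha.2.1⟩,
      by rw [decide_eq_true_iff]; exact ⟨hS, ha.2.2⟩⟩

lemma known_iff (order q : List Int) :
    (((pvFirsts order q).length == (pvOnes q).length) = true) ↔ ∀ a ∈ pvOnes q, a ∈ order := by
  rw [beq_iff_eq, pvFirsts_len_iff]

-- per-query equivalence, ctq test
lemma ctq_cond (order q : List Int) (k : Int) (hk0 : 0 ≤ k) :
    (pvCtqFlag (order.take (k.toNat + 1)) q (PySem.List.pyRange 0 (q.length : Int) 1) = true)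
    ↔ ((((pvFirsts order q).length == (pvOnes q).length) &&
        Option.all (fun m => decide (m ≤ k))
          (if (((pvFirsts order q).length == (pvOnes q).length) = true ∧ pvFirsts order q ≠ [])
           then PySem.List.max? (pvFirsts order q) (fun x => x) else none)) = true) := by
  rw [pvCtqFlag_iff, forall_range_ones]
  by_cases hK : (((pvFirsts order q).length == (pvOnes q).length) = true)
  · by_cases hF : pvFirsts order q = []
    · have hones : pvOnes q = [] := by
        have := (beq_iff_eq (a := (pvFirsts order q).length)).mp hK
        rw [hF] at this
        exact List.eq_nil_of_length_eq_zero this.symm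
      simp [hK, hF, hones]
    · rcases hmax : PySem.List.max? (pvFirsts order q) (fun x => x) with _ | M
      · exact absurd ((PySem.List.max?_eq_none_iff _ _).mp hmax) hF
      simp only [hK, Bool.true_and,
        if_pos (show True ∧ pvFirsts order q ≠ [] from ⟨trivial, hF⟩), Option.all_some]
      rw [decide_eq_true_iff, max?_le_iff _ _ _ hmax]
      have hknown := (known_iff order q).mp hK
      constructor
      · intro h x hx
        rcases (mem_pvFirsts order q x).mp hx with ⟨a, ha, p, hp, rfl⟩
        rcases (mem_take_iff_index order a (k.toNat + 1)).mp (h a ha) with ⟨p', hp', hpm⟩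
        rw [hp] at hp'
        cases hp'
        omega
      · intro h a ha
        obtain ⟨p, hp⟩ := Option.isSome_iff_exists.mp ((PySem.List.index?_isSome_iff _ _).mpr (hknown a ha))
        rw [mem_take_iff_index]
        refine ⟨p, hp, ?_⟩
        have hx : ((p : Nat) : Int) ∈ pvFirsts order q := (mem_pvFirsts order q _).mpr ⟨a, ha, p, hp, rfl⟩
        have := h _ hx
        omega
  · simp only [hK, Bool.false_and]
    refine iff_of_false (fun hall => hK ?_) (by simp)
    rw [known_iff]
    intro a ha
    rcases (mem_take_iff_index order a (k.toNat + 1)).mp (hall a ha) with ⟨p, hp, _⟩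
    exact (PySem.List.index?_isSome_iff _ _).mp (by rw [hp]; rfl)

-- per-query equivalence, cbq test
lemma cbq_cond (order q : List Int) (k : Int) (hk0 : 0 ≤ k) :
    (pvCbqFlag (order.take (k.toNat + 1)) q (PySem.List.pyRange 0 (q.length : Int) 1) = true)
    ↔ ((Option.all (fun m => decide (k < m))
          (PySem.List.min? (pvFirsts order q) (fun x => x))) = true) := by
  rw [pvCbqFlag_iff, forall_range_ones_not]
  rcases hmin : PySem.List.min? (pvFirsts order q) (fun x => x) with _ | m0
  · have hF := (PySem.List.min?_eq_none_iff _ _).mp hmin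
    have hnone := (pvFirsts_nil_iff order q).mp hF
    refine iff_of_true (fun a ha hup => ?_) rfl
    rcases (mem_take_iff_index order a (k.toNat + 1)).mp hup with ⟨p, hp, _⟩
    exact hnone a ha ((PySem.List.index?_isSome_iff _ _).mp (by rw [hp]; rfl))
  · simp only [Option.all_some, decide_eq_true_iff]
    rw [lt_min?_iff _ _ _ hmin]
    constructor
    · intro h x hx
      rcases (mem_pvFirsts order q x).mp hx with ⟨a, ha, p, hp, rfl⟩
      have hnup := h a ha
      rw [mem_take_iff_index] at hnup
      by_contra hnk
      exact hnup ⟨p, hp, by omega⟩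
    · intro h a ha hup
      rcases (mem_take_iff_index order a (k.toNat + 1)).mp hup with ⟨p, hp, hpm⟩
      have hx : ((p : Nat) : Int) ∈ pvFirsts order q := (mem_pvFirsts order q _).mpr ⟨a, ha, p, hp, rfl⟩
      have := h _ hx
      omega

-- per-query equivalence, coq test
lemma coq_cond (order q : List Int) (k : Int) (hk0 : 0 ≤ k) (hk1 : k < (order.length : Int) - 1) :
    ((((PySem.List.pyRange 0 (q.length : Int) 1).any
        (fun idx => decide (idx ∈ order.take (k.toNat + 1) ∧ PySem.List.pyGetD q idx 0 = 1))) = true)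
     ∧ (((PySem.List.pyRange 0 (q.length : Int) 1).any
        (fun idx => decide (idx ∈ order.drop (k.toNat + 1) ∧ PySem.List.pyGetD q idx 0 = 1))) = true))
    ↔ ((Option.any (fun m => decide (m ≤ k))
            (PySem.List.min? (pvFirsts order q) (fun x => x)) &&
        Option.any (fun l => decide (k < l))
            (PySem.List.max? (pvLasts order.reverse (order.length : Int) q) (fun x => x))) = true) := by
  rw [any_range_ones, any_range_ones]
  rcases hmin : PySem.List.min? (pvFirsts order q) (fun x => x) with _ | m0
  · have hF := (PySem.List.min?_eq_none_iff _ _).mp hmin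
    have hnone := (pvFirsts_nil_iff order q).mp hF
    refine iff_of_false (fun ⟨⟨a, ha, hup⟩, _⟩ => ?_) (by simp)
    rcases (mem_take_iff_index order a (k.toNat + 1)).mp hup with ⟨p, hp, _⟩
    exact hnone a ha ((PySem.List.index?_isSome_iff _ _).mp (by rw [hp]; rfl))
  · have hFne : pvFirsts order q ≠ [] := by
      intro hF; rw [hF] at hmin; simp [PySem.List.min?] at hmin
    have hLne : pvLasts order.reverse (order.length : Int) q ≠ [] := by
      intro hL
      have hnone := (pvLasts_nil_iff _ _ _).mp hL
      rcases List.exists_mem_of_ne_nil _ hFne with ⟨x, hx⟩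
      rcases (mem_pvFirsts order q x).mp hx with ⟨a, ha, p, hp, rfl⟩
      exact hnone a ha (by
        rw [List.mem_reverse]
        exact (PySem.List.index?_isSome_iff _ _).mp (by rw [hp]; rfl))
    rcases hmax : PySem.List.max? (pvLasts order.reverse (order.length : Int) q) (fun x => x) with _ | M1
    · exact absurd ((PySem.List.max?_eq_none_iff _ _).mp hmax) hLne
    simp only [Option.any_some, Bool.and_eq_true, decide_eq_true_iff]
    rw [min?_le_iff _ _ _ hmin, lt_max?_iff _ _ _ hmax]
    constructor
    · rintro ⟨⟨a, ha, hup⟩, ⟨b, hb, hbot⟩⟩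
      constructor
      · rcases (mem_take_iff_index order a (k.toNat + 1)).mp hup with ⟨p, hp, hpm⟩
        exact ⟨((p : Nat) : Int), (mem_pvFirsts order q _).mpr ⟨a, ha, p, hp, rfl⟩, by omega⟩
      · rcases (mem_drop_iff_index_rev order b (k.toNat + 1)).mp hbot with ⟨p, hp, hpm⟩
        refine ⟨(order.length : Int) - 1 - (p : Int),
          (mem_pvLasts _ _ _ _).mpr ⟨b, hb, p, hp, rfl⟩, ?_⟩
        have hplt : p < order.length - (k.toNat + 1) := hpm
        omega
    · rintro ⟨⟨x, hx, hxk⟩, ⟨y, hy, hyk⟩⟩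
      constructor
      · rcases (mem_pvFirsts order q x).mp hx with ⟨a, ha, p, hp, rfl⟩
        exact ⟨a, ha, (mem_take_iff_index order a (k.toNat + 1)).mpr ⟨p, hp, by omega⟩⟩
      · rcases (mem_pvLasts _ _ _ y).mp hy with ⟨b, hb, p, hp, rfl⟩
        refine ⟨b, hb, (mem_drop_iff_index_rev order b (k.toNat + 1)).mpr ⟨p, hp, ?_⟩⟩
        omega

-- A's 'for q_num, query in enumerate(...)' accumulation as a sum over zip(use, freq)
lemma enumFoldSum (P : List Int → Prop) [DecidablePred P] (F : List Int) :
    ∀ (use : List (List Int)) (s : Nat) (acc : Int), s + use.length ≤ F.length →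
    (PySem.List.enumerate use ((s : Nat) : Int)).foldl
      (fun c p => if P p.2 then c + PySem.List.pyGetD F p.1 0 else c) acc
    = acc + ((use.zip (F.drop s)).map (fun qf => if P qf.1 then qf.2 else 0)).sum := by
  intro use
  induction use with
  | nil => intro s acc h; simp [PySem.List.enumerate]
  | cons q t ih =>
    intro s acc h
    have hs : s < F.length := by simp at h; omega
    rw [PySem.List.enumerate_cons, List.foldl_cons]
    have hdrop : F.drop s = F[s] :: F.drop (s + 1) := List.drop_eq_getElem_cons hs
    rw [hdrop, List.zip_cons_cons, List.map_cons, List.sum_cons]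
    have hcast : ((s : Nat) : Int) + 1 = (((s + 1 : Nat)) : Int) := by push_cast; ring
    rw [hcast, ih (s + 1) _ (by simp at h ⊢; omega)]
    have hget : PySem.List.pyGetD F ((s : Nat) : Int) 0 = F[s] := by
      rw [PySem.List.pyGetD_natCast, List.getD_eq_getElem _ _ hs]
    simp only [hget]
    split_ifs with hp
    · ring
    · ring

-- B's one-pass triple accumulator as three sums
lemma foldl_triple_sum {ζ : Type} (g1 g2 g3 : ζ → Bool) (val : ζ → Int) :
    ∀ (L : List ζ) (a b c : Int),
    L.foldl (fun t sf => ((if g1 sf then t.1 + val sf else t.1),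
                          (if g2 sf then t.2.1 + val sf else t.2.1),
                          (if g3 sf then t.2.2 + val sf else t.2.2))) (a, b, c)
    = (a + (L.map (fun sf => if g1 sf then val sf else 0)).sum,
       b + (L.map (fun sf => if g2 sf then val sf else 0)).sum,
       c + (L.map (fun sf => if g3 sf then val sf else 0)).sum) := by
  intro L
  induction L with
  | nil => intro a b c; simp
  | cons x t ih =>
    intro a b c
    rw [List.foldl_cons, ih]
    simp only [List.map_cons, List.sum_cons]
    split_ifs <;> refine Prod.ext ?_ (Prod.ext ?_ ?_) <;> simp <;> ring

-- the candidate value of split k equals B's score of split k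
lemma candA_val (use_matrix : List (List Int)) (order freq_sum : List Int)
    (hfreq : use_matrix.length ≤ freq_sum.length) (k : Int) (hk0 : 0 ≤ k)
    (hk1 : k < (order.length : Int) - 1) :
    (pvCandA use_matrix order freq_sum k).1
    = pvScore ((use_matrix.map (pvStat order order.reverse (order.length : Int))).zip freq_sum) k := by
  have hup : PySem.List.slice order none (some (k + 1)) = order.take (k.toNat + 1) := by
    rw [PySem.List.slice_to _ (by omega)]
    congr 1
    omega
  have hbot : PySem.List.slice order (some (k + 1)) none = order.drop (k.toNat + 1) := by
    rw [PySem.List.slice_from _ (by omega)]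
    congr 1
    omega
  simp only [pvCandA, hup, hbot]
  have hc1 := enumFoldSum
    (fun q => pvCtqFlag (order.take (k.toNat + 1)) q (PySem.List.pyRange 0 (q.length : Int) 1) = true)
    freq_sum use_matrix 0 0 (by omega)
  have hc2 := enumFoldSum
    (fun q => pvCbqFlag (order.take (k.toNat + 1)) q (PySem.List.pyRange 0 (q.length : Int) 1) = true)
    freq_sum use_matrix 0 0 (by omega)
  have hc3 := enumFoldSum
    (fun q => (pvCoqFlags (order.take (k.toNat + 1)) (order.drop (k.toNat + 1)) q).1 = true
              ∧ (pvCoqFlags (order.take (k.toNat + 1)) (order.drop (k.toNat + 1)) q).2 = true)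
    freq_sum use_matrix 0 0 (by omega)
  simp only [Nat.cast_zero, List.drop_zero, zero_add] at hc1 hc2 hc3
  rw [hc1, hc2, hc3]
  simp only [pvScore]
  rw [foldl_triple_sum
      (fun (sf : (Bool × Option Int × Option Int × Option Int) × Int) =>
        sf.1.1 && sf.1.2.1.all (fun m => decide (m ≤ k)))
      (fun (sf : (Bool × Option Int × Option Int × Option Int) × Int) =>
        sf.1.2.2.1.all (fun m => decide (k < m)))
      (fun (sf : (Bool × Option Int × Option Int × Option Int) × Int) =>
        sf.1.2.2.1.any (fun m => decide (m ≤ k)) && sf.1.2.2.2.any (fun l => decide (k < l)))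
      (fun (sf : (Bool × Option Int × Option Int × Option Int) × Int) => sf.2)]
  simp only [zero_add]
  rw [List.zip_map_left, List.map_map, List.map_map, List.map_map]
  have heq1 : ∀ qf : List Int × Int,
      ((fun (sf : (Bool × Option Int × Option Int × Option Int) × Int) => if (sf.1.1 && sf.1.2.1.all (fun m => decide (m ≤ k))) = true then sf.2 else (0:Int)) ∘ Prod.map (pvStat order order.reverse (order.length : Int)) id) qf
      = (if pvCtqFlag (order.take (k.toNat + 1)) qf.1 (PySem.List.pyRange 0 (qf.1.length : Int) 1) = true then qf.2 else 0) := by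
    intro qf
    simp only [Function.comp, Prod.map, id]
    rw [pvStat_eq]
    rw [if_congr (Iff.symm (ctq_cond order qf.1 k hk0)) rfl rfl]
  have heq2 : ∀ qf : List Int × Int,
      ((fun (sf : (Bool × Option Int × Option Int × Option Int) × Int) => if (sf.1.2.2.1.all (fun m => decide (k < m))) = true then sf.2 else (0:Int)) ∘ Prod.map (pvStat order order.reverse (order.length : Int)) id) qf
      = (if pvCbqFlag (order.take (k.toNat + 1)) qf.1 (PySem.List.pyRange 0 (qf.1.length : Int) 1) = true then qf.2 else 0) := by
    intro qf
    simp only [Function.comp, Prod.map, id]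
    rw [pvStat_eq]
    rw [if_congr (Iff.symm (cbq_cond order qf.1 k hk0)) rfl rfl]
  have heq3 : ∀ qf : List Int × Int,
      ((fun (sf : (Bool × Option Int × Option Int × Option Int) × Int) => if (sf.1.2.2.1.any (fun m => decide (m ≤ k)) && sf.1.2.2.2.any (fun l => decide (k < l))) = true then sf.2 else (0:Int)) ∘ Prod.map (pvStat order order.reverse (order.length : Int)) id) qf
      = (if ((pvCoqFlags (order.take (k.toNat + 1)) (order.drop (k.toNat + 1)) qf.1).1 = true
            ∧ (pvCoqFlags (order.take (k.toNat + 1)) (order.drop (k.toNat + 1)) qf.1).2 = true) then qf.2 else 0) := by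
    intro qf
    simp only [Function.comp, Prod.map, id]
    rw [pvStat_eq, pvCoqFlags_eq]
    exact if_congr (Iff.symm (coq_cond order qf.1 k hk0 hk1)) rfl rfl
  rw [funext heq1, funext heq2, funext heq3]
  ring

-- first-argmax selection: A's max over candidates against B's running-best fold
lemma pvSelMax (f : Int → Int × List Int × List Int) (v : Int → Int) :
    ∀ (l : List Int) (bk : Int), (∀ k ∈ l, (f k).1 = v k) → (f bk).1 = v bk →
      (PySem.List.max? ((bk :: l).map f) (fun c => c.1)
        = some (f ((l.foldl (fun st k =>
            if st.1.all (fun bv => decide (bv < v k)) then (some (v k), k) else st)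
            ((some (v bk), bk) : Option Int × Int)).2)))
      ∧ ((l.foldl (fun st k =>
            if st.1.all (fun bv => decide (bv < v k)) then (some (v k), k) else st)
            ((some (v bk), bk) : Option Int × Int)).1
          = some (v (l.foldl (fun st k =>
            if st.1.all (fun bv => decide (bv < v k)) then (some (v k), k) else st)
            ((some (v bk), bk) : Option Int × Int)).2)) := by
  intro l
  induction l with
  | nil => intro bk _ hbk; exact ⟨rfl, rfl⟩
  | cons x t ih =>
    intro bk hl hbk
    have hx : (f x).1 = v x := hl x (List.mem_cons_self ..)
    have hl' : ∀ k ∈ t, (f k).1 = v k := fun k hk => hl k (List.mem_cons_of_mem _ hk)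
    rw [List.foldl_cons]
    by_cases hlt : v bk < v x
    · have hA : PySem.List.max? ((bk :: x :: t).map f) (fun c => c.1)
          = PySem.List.max? ((x :: t).map f) (fun c => c.1) := by
        simp only [PySem.List.max?, List.map_cons, List.foldl_cons]
        congr 1
        show (if (f bk).1 < (f x).1 then some (f x) else some (f bk)) = some (f x)
        rw [hbk, hx, if_pos hlt]
      have hB : (if Option.all (fun bv => decide (bv < v x)) ((some (v bk), bk) : Option Int × Int).1
                 then (some (v x), x) else ((some (v bk), bk) : Option Int × Int))
          = ((some (v x), x) : Option Int × Int) := by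
        simp only [Option.all_some]
        rw [if_pos (by simpa using hlt)]
      rw [hB]
      rw [hA]
      exact ih x hl' hx
    · have hA : PySem.List.max? ((bk :: x :: t).map f) (fun c => c.1)
          = PySem.List.max? ((bk :: t).map f) (fun c => c.1) := by
        simp only [PySem.List.max?, List.map_cons, List.foldl_cons]
        congr 1
        show (if (f bk).1 < (f x).1 then some (f x) else some (f bk)) = some (f bk)
        rw [hbk, hx, if_neg hlt]
      have hB : (if Option.all (fun bv => decide (bv < v x)) ((some (v bk), bk) : Option Int × Int).1
                 then (some (v x), x) else ((some (v bk), bk) : Option Int × Int))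
          = ((some (v bk), bk) : Option Int × Int) := by
        simp only [Option.all_some]
        rw [if_neg (by simpa using hlt)]
      rw [hB]
      rw [hA]
      exact ih bk hl' hbk

-- ===== VERDICT (by name: the statement is the Claim_ definition above) =====
theorem fragment_spec : Claim_equal_fragment := by
  unfold Claim_equal_fragment
  intro use_matrix freq_matrix ca_matrix order freq_sum hdom hpre
  obtain ⟨hord, hfreq⟩ := hpre
  unfold Spec_fragment
  simp only [fragment, fragment_alt]
  rw [PySem.List.foldl_append_singleton_eq_map, PySem.List.foldl_append_singleton_eq_map]
  simp only [List.nil_append]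
  set n : Int := (order.length : Int) with hn
  have hn2 : (0 : Int) < n - 1 := by omega
  set statf := pvStat order order.reverse n with hstatf
  set zs := (use_matrix.map statf).zip freq_sum with hzs
  set candA := pvCandA use_matrix order freq_sum with hcand
  have hval : ∀ k ∈ PySem.List.pyRange 1 (n - 1) 1, (candA k).1 = pvScore zs k := by
    intro k hk
    rw [PySem.List.mem_pyRange_one] at hk
    exact candA_val use_matrix order freq_sum hfreq k (by omega) (by omega)
  have hval0 : (candA 0).1 = pvScore zs 0 := candA_val use_matrix order freq_sum hfreq 0 (by omega) (by omega)
  rw [PySem.List.pyRange_one_cons hn2]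
  simp only [zero_add, ← hzs]
  have hsel := pvSelMax candA (fun k => pvScore zs k) (PySem.List.pyRange 1 (n - 1) 1) 0 hval hval0
  rw [List.foldl_cons]
  rw [show (if Option.all (fun bv => decide (bv < pvScore zs 0)) (none : Option Int) = true
           then (some (pvScore zs 0), (0 : Int)) else ((none : Option Int), (0 : Int)))
        = (some (pvScore zs 0), (0 : Int)) from rfl]
  rw [hsel.1]
  simp only [hsel.2]
  rw [if_neg (Option.some_ne_none _)]
  rw [hcand]
  simp only [pvCandA]
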